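-- pv_equiv track=rewrite | github.com/kalyaniasthana/FindingMutationsInDNAAndProteins_BioinformaticsVI | w_3.py | first_occurrence_matrix
-- ===== SOURCE A (Python) =====
-- def first_occurrence_matrix(last_column):
-- 	first_column = list(last_column)
-- 	first_column.sort()
-- 	first_occurrence = {}
-- 	for i in range(len(first_column)):
-- 		symbol = first_column[i]
-- 		if symbol not in first_occurrence:
-- 			first_occurrence[symbol] = i
-- 	return first_occurrence
-- ===== SOURCE B (Python) =====
-- def first_occurrence_matrix(last_column):
-- 	counts = {}
-- 	for symbol in last_column:
-- 		counts[symbol] = counts.get(symbol, 0) + 1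
-- 	first_occurrence = {}
-- 	offset = 0
-- 	for symbol in sorted(counts):
-- 		first_occurrence[symbol] = offset
-- 		offset += counts[symbol]
-- 	return first_occurrence
-- ===== Notes on version B (the rewrite author's own statement) =====
-- stated objective: faster
-- what changed: Instead of sorting the whole column (O(n log n)) and scanning it for first occurrences, B counts symbol frequencies in one pass and derives each first-occurrence index as a running prefix sum over the sorted distinct symbols.
import Mathlib
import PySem

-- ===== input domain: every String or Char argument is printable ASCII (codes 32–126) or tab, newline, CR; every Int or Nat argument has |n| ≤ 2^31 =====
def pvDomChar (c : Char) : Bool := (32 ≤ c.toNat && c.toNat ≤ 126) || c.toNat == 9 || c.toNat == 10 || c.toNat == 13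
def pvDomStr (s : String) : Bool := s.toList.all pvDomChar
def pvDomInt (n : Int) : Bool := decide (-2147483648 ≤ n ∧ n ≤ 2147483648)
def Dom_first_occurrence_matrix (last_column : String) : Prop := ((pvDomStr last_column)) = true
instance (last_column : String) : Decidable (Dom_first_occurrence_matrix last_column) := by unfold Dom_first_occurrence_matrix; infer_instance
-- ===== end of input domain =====

-- B replaces A's sort-the-whole-column-and-scan with a one-pass frequency count plus
-- prefix sums over the sorted distinct symbols (objective: faster, asymptotically).

-- ===== PORT A =====
def first_occurrence_matrix (last_column : String) : List (String × Int) :=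
  let first_column := PySem.List.sorted last_column.toList (fun c => c)
  ((PySem.List.pyRange 0 (PySem.List.len first_column)).foldl
    (fun (first_occurrence : PySem.Dict String Int) i =>
      let symbol := String.ofList [PySem.List.pyGetD first_column i ' ']
      if first_occurrence.contains symbol then first_occurrence
      else first_occurrence.insert symbol i)
    PySem.Dict.empty).items

-- ===== PORT B =====
def first_occurrence_matrix_alt (last_column : String) : List (String × Int) :=
  let counts : PySem.Dict Char Int :=
    last_column.toList.foldl (fun d symbol => d.insert symbol (d.getD symbol 0 + 1)) PySem.Dict.empty
  ((PySem.List.sorted counts.keys (fun c => c)).foldl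
    (fun (p : PySem.Dict String Int × Int) symbol =>
      (p.1.insert (String.ofList [symbol]) p.2, p.2 + counts.getD symbol 0))
    (PySem.Dict.empty, (0 : Int))).1.items

-- ===== PRECONDITION & SPEC =====
def Spec_first_occurrence_matrix (last_column : String) (out : List (String × Int)) : Prop := out = first_occurrence_matrix_alt last_column
instance (last_column : String) (out : List (String × Int)) : Decidable (Spec_first_occurrence_matrix last_column out) := by unfold Spec_first_occurrence_matrix; infer_instance

-- ===== CLAIM (what is proved, stated in full; the proofs are below) =====
def Claim_equal_first_occurrence_matrix : Prop := ∀ (last_column : String), Dom_first_occurrence_matrix last_column → Spec_first_occurrence_matrix last_column (first_occurrence_matrix last_column)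

-- ===== LEMMAS AND PROOFS =====

/-- The one-character string a Python `symbol` becomes. -/
def mkS (c : Char) : String := String.ofList [c]

lemma mkS_inj {a b : Char} (h : mkS a = mkS b) : a = b := by
  have := congrArg String.toList h
  simpa [mkS] using this

/-- What A's scan of the sorted column appends, given the keys `K` already present. -/
def Aspec (l : List Char) (s0 : Int) (K : List String) : List (String × Int) :=
  match l with
  | [] => []
  | c :: t =>
    if mkS c ∈ K then Aspec t (s0 + 1) K
    else (mkS c, s0) :: Aspec t (s0 + 1) (K ++ [mkS c])

/-- What B's prefix-sum loop appends: each symbol paired with the running offset. -/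
def Bspec (cnt : Char → Int) : List Char → Int → List (String × Int)
  | [], _ => []
  | c :: t, off => (mkS c, off) :: Bspec cnt t (off + cnt c)

/-- The distinct values of a list, keeping the first copy of each value in order. -/
def myDistinct : List Char → List Char
  | [] => []
  | c :: t => c :: myDistinct (t.filter (fun x => x ≠ c))
termination_by l => l.length
decreasing_by
  simp only [List.length_unattach]
  exact Nat.lt_succ_of_le (le_trans (List.length_filter_le _ _) (by simp))

lemma myDistinct_lemmas : ∀ (n : Nat) (l : List Char), l.length ≤ n →
    (∀ x, x ∈ myDistinct l ↔ x ∈ l) ∧ (myDistinct l).Nodup ∧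
    (l.Pairwise (· ≤ ·) → (myDistinct l).Pairwise (· < ·)) := by
  intro n
  induction n with
  | zero =>
    intro l hl
    rw [List.length_eq_zero_iff.mp (Nat.le_zero.mp hl)]
    refine ⟨by simp [myDistinct], by simp [myDistinct], by simp [myDistinct]⟩
  | succ m ih =>
    intro l hl
    match l with
    | [] => refine ⟨by simp [myDistinct], by simp [myDistinct], by simp [myDistinct]⟩
    | c :: t =>
      have hlen : (t.filter (fun x => x ≠ c)).length ≤ m := by
        have := List.length_filter_le (fun x => x ≠ c) t
        simp only [List.length_cons] at hl
        omega
      obtain ⟨ihmem, ihnd, ihpw⟩ := ih _ hlen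
      refine ⟨?_, ?_, ?_⟩
      · intro x
        rw [myDistinct]
        by_cases hx : x = c
        · simp [hx]
        · simp only [List.mem_cons, hx, false_or, ihmem, List.mem_filter]
          simp [hx]
      · rw [myDistinct]
        refine List.nodup_cons.mpr ⟨?_, ihnd⟩
        intro hc
        have := (ihmem c).mp hc
        simp [List.mem_filter] at this
      · intro hp
        rcases List.pairwise_cons.mp hp with ⟨hle, ht⟩
        rw [myDistinct]
        refine List.pairwise_cons.mpr ⟨?_, ihpw (ht.sublist List.filter_sublist)⟩
        intro x hx
        rcases List.mem_filter.mp ((ihmem x).mp hx) with ⟨hxt, hne⟩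
        exact lt_of_le_of_ne (hle x hxt) (Ne.symm (by simpa using hne))

lemma mem_myDistinct (l : List Char) (x : Char) : x ∈ myDistinct l ↔ x ∈ l :=
  (myDistinct_lemmas l.length l le_rfl).1 x

lemma nodup_myDistinct (l : List Char) : (myDistinct l).Nodup :=
  (myDistinct_lemmas l.length l le_rfl).2.1

lemma pairwise_myDistinct (l : List Char) (h : l.Pairwise (· ≤ ·)) :
    (myDistinct l).Pairwise (· < ·) :=
  (myDistinct_lemmas l.length l le_rfl).2.2 h

/-- A's loop, characterised: folding over the enumerated list appends `Aspec`. -/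
lemma afold (l : List Char) : ∀ (s0 : Int) (d : PySem.Dict String Int),
    ((PySem.List.enumerate l s0).foldl
      (fun d p => if d.contains (mkS p.2) then d else d.insert (mkS p.2) p.1) d).items
    = d.items ++ Aspec l s0 d.keys := by
  induction l with
  | nil => intro s0 d; simp [PySem.List.enumerate_nil, Aspec]
  | cons c t ih =>
    intro s0 d
    rw [PySem.List.enumerate_cons, List.foldl_cons]
    by_cases hc : d.contains (mkS c) = true
    · have hk : mkS c ∈ d.keys := (PySem.Dict.contains_iff_mem_keys _ _).mp hc
      simp only [hc, if_true]
      rw [ih, Aspec, if_pos hk]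
    · have hc' : d.contains (mkS c) = false := by simpa using hc
      have hk : ¬ mkS c ∈ d.keys := fun h => by
        rw [(PySem.Dict.contains_iff_mem_keys _ _).mpr h] at hc'; exact absurd hc' (by simp)
      simp only [hc', Bool.false_eq_true, if_false]
      rw [ih, PySem.Dict.items_insert_of_not_contains d s0 hc',
        PySem.Dict.keys_insert_of_not_contains d s0 hc', Aspec, if_neg hk]
      simp

/-- B's loop, characterised: inserting fresh distinct keys appends `Bspec`. -/
lemma bfold (cnt : Char → Int) (ks : List Char) :
    ∀ (d : PySem.Dict String Int) (off : Int), ks.Nodup →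
    (∀ c ∈ ks, d.contains (mkS c) = false) →
    ((ks.foldl (fun p c => (p.1.insert (mkS c) p.2, p.2 + cnt c)) (d, off)).1).items
    = d.items ++ Bspec cnt ks off := by
  induction ks with
  | nil => intro d off _ _; simp [Bspec]
  | cons c t ih =>
    intro d off hnd hfresh
    rcases List.nodup_cons.mp hnd with ⟨hct, hndt⟩
    have hc : d.contains (mkS c) = false := hfresh c (by simp)
    rw [List.foldl_cons, ih _ _ hndt ?fresh]
    · rw [PySem.Dict.items_insert_of_not_contains d off hc, Bspec]
      simp
    case fresh =>
      intro c' hc'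
      rw [PySem.Dict.contains_insert]
      have hne : c' ≠ c := fun h => hct (h ▸ hc')
      have : (mkS c' == mkS c) = false := by
        simp only [beq_eq_false_iff_ne, ne_eq]
        exact fun h => hne (mkS_inj h)
      rw [this, hfresh c' (by simp [hc'])]
      simp

lemma aspec_replicate (n : Nat) (c : Char) : ∀ (t : List Char) (o : Int) (K : List String),
    mkS c ∈ K → Aspec (List.replicate n c ++ t) o K = Aspec t (o + n) K := by
  induction n with
  | zero => intro t o K _; simp
  | succ m ih =>
    intro t o K hK
    rw [List.replicate_succ, List.cons_append, Aspec, if_pos hK, ih t (o + 1) K hK]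
    congr 1
    push_cast
    ring

/-- In a sorted list whose head value is minimal, all copies of the head come first. -/
lemma sorted_block (c : Char) (t : List Char) (h1 : ∀ x ∈ t, c ≤ x) (h2 : t.Pairwise (· ≤ ·)) :
    t = List.replicate (t.count c) c ++ t.filter (fun x => x ≠ c) := by
  induction t with
  | nil => simp
  | cons x r ih =>
    rcases List.pairwise_cons.mp h2 with ⟨hxr, hr⟩
    by_cases hx : x = c
    · subst hx
      have := ih (fun y hy => h1 y (by simp [hy])) hr
      rw [List.count_cons_self, List.replicate_succ, List.cons_append]
      simpa using this
    · have hcx : c < x := lt_of_le_of_ne (h1 x (by simp)) (Ne.symm hx)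
      have hcr : c ∉ (x :: r) := by
        intro hc
        rcases List.mem_cons.mp hc with h | hc
        · exact hx h.symm
        · exact absurd (hxr c hc) (not_le.mpr hcx)
      rw [List.count_eq_zero.mpr hcr, List.replicate_zero, List.nil_append,
        List.filter_eq_self.mpr]
      intro y hy
      simp only [ne_eq, decide_eq_true_eq]
      intro h
      exact hcr (h ▸ hy)

lemma bspec_congr (f g : Char → Int) : ∀ (ks : List Char) (off : Int),
    (∀ c ∈ ks, f c = g c) → Bspec f ks off = Bspec g ks off := by
  intro ks
  induction ks with
  | nil => intro off _; rfl
  | cons c t ih =>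
    intro off h
    rw [Bspec, Bspec, h c (by simp), ih _ (fun c' hc' => h c' (by simp [hc']))]

/-- Core bridge: on a sorted list, A's first-occurrence indices are B's prefix sums. -/
lemma core : ∀ (n : Nat) (l : List Char), l.length ≤ n → l.Pairwise (· ≤ ·) →
    ∀ (off : Int) (K : List String), (∀ c ∈ l, mkS c ∉ K) →
    Aspec l off K = Bspec (fun c => (l.count c : Int)) (myDistinct l) off := by
  intro n
  induction n with
  | zero =>
    intro l hl _ off K _
    rw [List.length_eq_zero_iff.mp (Nat.le_zero.mp hl)]
    simp [Aspec, myDistinct, Bspec]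
  | succ m ih =>
    intro l hl hp off K hK
    match l with
    | [] => simp [Aspec, myDistinct, Bspec]
    | c :: t =>
      rcases List.pairwise_cons.mp hp with ⟨hle, ht⟩
      have hKc : mkS c ∉ K := hK c (by simp)
      set l' := t.filter (fun x => x ≠ c) with hl'
      have hblock : t = List.replicate (t.count c) c ++ l' := sorted_block c t hle ht
      have hlen' : l'.length ≤ m := by
        have : l'.length ≤ t.length := List.length_filter_le _ _
        simp only [List.length_cons] at hl
        omega
      have hp' : l'.Pairwise (· ≤ ·) := ht.sublist List.filter_sublist
      have hK' : ∀ x ∈ l', mkS x ∉ K ++ [mkS c] := by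
        intro x hx
        rcases List.mem_filter.mp hx with ⟨hxt, hne⟩
        simp only [List.mem_append, List.mem_singleton]
        rintro (h | h)
        · exact hK x (by simp [hxt]) h
        · exact absurd (mkS_inj h) (by simpa using hne)
      rw [Aspec, if_neg hKc]
      conv_lhs => rw [hblock]
      rw [aspec_replicate _ _ _ _ _ (by simp), ih l' hlen' hp' _ _ hK']
      rw [myDistinct]
      rw [Bspec]
      congr 1
      · -- align the starting offsets and the count functions
        have hoff : off + 1 + (t.count c : Int) = off + ((c :: t).count c : Int) := by
          rw [List.count_cons_self]; push_cast; ring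
        rw [hoff]
        apply bspec_congr
        intro x hx
        have hx' := (mem_myDistinct _ _).mp hx
        rcases List.mem_filter.mp hx' with ⟨hxt, hne⟩
        have hxc : x ≠ c := by simpa using hne
        have h1 : (c :: t).count x = t.count x := List.count_cons_of_ne (Ne.symm hxc)
        have h2 : t.count x = l'.count x := by
          conv_lhs => rw [hblock]
          rw [List.count_append, List.count_replicate]
          have hcx : ¬ c = x := fun h => hxc h.symm
          simp [hcx]
        simp [h1, h2]

/-- `myDistinct` of the sorted column names the sorted distinct symbols. -/
lemma sorted_set_eq_myDistinct (s : List Char) :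
    PySem.List.sorted (PySem.Set.ofList s) (fun c => c)
      = myDistinct (PySem.List.sorted s (fun c => c)) := by
  apply PySem.List.sorted_eq_of_perm_of_pairwise_lt
  · apply (List.perm_ext_iff_of_nodup (nodup_myDistinct _) (PySem.Set.nodup_ofList s)).mpr
    intro a
    rw [mem_myDistinct, PySem.List.mem_sorted, PySem.Set.mem_ofList]
  · have := pairwise_myDistinct (PySem.List.sorted s (fun c => c))
      (by simpa using PySem.List.sorted_pairwise s (fun c => c))
    simpa using this

-- ===== VERDICT (by name: the statement is the Claim_ definition above) =====
theorem first_occurrence_matrix_spec : Claim_equal_first_occurrence_matrix := by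
  intro s _
  unfold Spec_first_occurrence_matrix first_occurrence_matrix first_occurrence_matrix_alt
  simp only []
  set sl := s.toList with hsl
  set l := PySem.List.sorted sl (fun c => c) with hls
  -- A's side: rewrite the index loop as a loop over the enumerated list
  have hA : ((PySem.List.pyRange 0 (PySem.List.len l)).foldl
      (fun (d : PySem.Dict String Int) i =>
        let symbol := String.ofList [PySem.List.pyGetD l i ' ']
        if d.contains symbol then d else d.insert symbol i)
      PySem.Dict.empty).items = Aspec l 0 [] := by
    rw [show ((PySem.List.pyRange 0 (PySem.List.len l)).foldl
        (fun (d : PySem.Dict String Int) i =>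
          let symbol := String.ofList [PySem.List.pyGetD l i ' ']
          if d.contains symbol then d else d.insert symbol i)
        PySem.Dict.empty)
      = ((PySem.List.pyRange 0 (PySem.List.len l)).map
          (fun j => (j, PySem.List.pyGetD l j ' '))).foldl
        (fun (d : PySem.Dict String Int) p =>
          if d.contains (mkS p.2) then d else d.insert (mkS p.2) p.1)
        PySem.Dict.empty from by rw [List.foldl_map]; rfl]
    rw [← PySem.List.enumerate_eq_map_pyRange l ' ', afold l 0 PySem.Dict.empty]
    rfl
  rw [hA]
  -- B's side: the counting loop is Counter, the second loop appends Bspec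
  rw [PySem.Dict.foldl_insert_getD_add_one_eq_counter sl, PySem.Dict.keys_counter sl]
  have hB : (((PySem.List.sorted (PySem.Set.ofList sl) (fun c => c)).foldl
      (fun (p : PySem.Dict String Int × Int) symbol =>
        (p.1.insert (String.ofList [symbol]) p.2, p.2 + (PySem.Dict.counter sl).getD symbol 0))
      (PySem.Dict.empty, (0 : Int))).1).items
      = Bspec (fun c => (PySem.Dict.counter sl).getD c 0)
          (PySem.List.sorted (PySem.Set.ofList sl) (fun c => c)) 0 := by
    exact (bfold (fun c => (PySem.Dict.counter sl).getD c 0)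
      (PySem.List.sorted (PySem.Set.ofList sl) (fun c => c)) PySem.Dict.empty 0
      ((PySem.List.sorted_perm (PySem.Set.ofList sl) (fun c => c) false).nodup_iff.mpr
        (PySem.Set.nodup_ofList sl))
      (fun c _ => PySem.Dict.contains_empty _)).trans (by rfl)
  rw [hB, sorted_set_eq_myDistinct sl]
  have hcnt : ∀ c ∈ myDistinct l, (PySem.Dict.counter sl).getD c 0 = (l.count c : Int) := by
    intro c _
    rw [PySem.Dict.getD_counter sl c]
    exact_mod_cast ((PySem.List.sorted_perm sl (fun c => c) false).count_eq c).symm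
  rw [bspec_congr _ _ _ 0 hcnt]
  exact core l.length l le_rfl (by simpa using PySem.List.sorted_pairwise sl (fun c => c)) 0 [] (by simp)
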